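-- pv_equiv track=rewrite | github.com/eeps24/AutoDD_Rev2 | AutoDD.py | append_rocket_tbl
-- ===== SOURCE A (Python) =====
-- from collections import Counter
--
-- def append_rocket_tbl(results_tbl, rockets_1, rockets_2):
--
--     rockets = Counter(rockets_1) + Counter(rockets_2)
--
--     for k, v in results_tbl:
--         if k in rockets.keys():
--             v.append(rockets[k])
--         else:
--             v.append(0)
--
--     return results_tbl
-- ===== SOURCE B (Python) =====
-- def append_rocket_tbl(results_tbl, rockets_1, rockets_2):
--     # Return-value equivalence: B builds fresh rows instead of mutating each v in place.
--     # Inverted loop: scatter each rocket occurrence into a per-row totals array,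
--     # then append each row's total.
--     totals = [0] * len(results_tbl)
--     for r in rockets_1 + rockets_2:
--         for i, (k, _) in enumerate(results_tbl):
--             if k == r:
--                 totals[i] += 1
--     return [(k, v + [t]) for (k, v), t in zip(results_tbl, totals)]
-- ===== Notes on version B (the rewrite author's own statement) =====
-- stated objective: alternative
-- what changed: Inverts the traversal: instead of building a Counter index and looking each row's key up, B keeps a per-row totals array and scatters every rocket occurrence from rockets_1+rockets_2 into the matching rows in one pass, then appends each row's accumulated total (no count table, no membership branch).
import Mathlib
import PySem

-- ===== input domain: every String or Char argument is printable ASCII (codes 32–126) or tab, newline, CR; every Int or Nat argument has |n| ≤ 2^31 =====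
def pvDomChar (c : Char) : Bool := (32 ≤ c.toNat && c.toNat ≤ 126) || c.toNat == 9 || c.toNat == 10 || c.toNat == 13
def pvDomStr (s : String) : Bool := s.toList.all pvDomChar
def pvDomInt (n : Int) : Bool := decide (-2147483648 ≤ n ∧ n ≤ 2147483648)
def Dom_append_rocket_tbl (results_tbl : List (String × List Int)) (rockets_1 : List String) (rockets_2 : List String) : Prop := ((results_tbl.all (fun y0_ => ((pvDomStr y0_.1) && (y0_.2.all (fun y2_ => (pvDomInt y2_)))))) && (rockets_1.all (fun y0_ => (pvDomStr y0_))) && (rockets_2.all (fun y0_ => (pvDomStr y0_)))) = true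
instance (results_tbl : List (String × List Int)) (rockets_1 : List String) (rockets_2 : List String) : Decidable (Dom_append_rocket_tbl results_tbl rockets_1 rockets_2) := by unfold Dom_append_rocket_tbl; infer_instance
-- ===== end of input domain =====

-- B replaces A's Counter index + per-row lookup by an inverted traversal: it scatters each
-- rocket occurrence into a per-row totals array, then appends each total; objective:
-- alternative. A mutates each row's list in place and returns the same table; the
-- equivalence proved here is about the RETURN value (B builds fresh rows).

-- ===== PORT A =====
-- Counter(_1) + Counter(_2): CPython's Counter.__add__ walks self's items keeping positive
-- sums, then other's items for keys not in self with positive counts.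
def pvCounterAdd (c1 c2 : PySem.Dict String Int) : PySem.Dict String Int :=
  c2.items.foldl
    (fun d kv => if ¬ c1.contains kv.1 ∧ kv.2 > 0 then d.insert kv.1 kv.2 else d)
    (c1.items.foldl
      (fun d kv => if kv.2 + c2.getD kv.1 0 > 0 then d.insert kv.1 (kv.2 + c2.getD kv.1 0) else d)
      PySem.Dict.empty)

def append_rocket_tbl (results_tbl : List (String × List Int)) (rockets_1 : List String) (rockets_2 : List String) : List (String × List Int) :=
  let rockets := pvCounterAdd (PySem.Dict.counter rockets_1) (PySem.Dict.counter rockets_2)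
  results_tbl.foldl
    (fun acc kv =>
      if rockets.contains kv.1 then acc ++ [(kv.1, kv.2 ++ [rockets.getD kv.1 0])]
      else acc ++ [(kv.1, kv.2 ++ [(0 : Int)])])
    []

-- ===== PORT B =====
-- totals = [0]*len(results_tbl); the inner 'for i,(k,_) in enumerate: if k==r: totals[i]+=1'
-- is rendered as a positionwise zipWith of the table row against its totals slot.
def append_rocket_tbl_alt (results_tbl : List (String × List Int)) (rockets_1 : List String) (rockets_2 : List String) : List (String × List Int) :=
  let totals0 : List Int := List.replicate results_tbl.length 0
  let totals := (rockets_1 ++ rockets_2).foldl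
    (fun t r => List.zipWith (fun kv ti => if kv.1 = r then ti + 1 else ti) results_tbl t)
    totals0
  (results_tbl.zip totals).map (fun p => (p.1.1, p.1.2 ++ [p.2]))

-- ===== PRECONDITION & SPEC =====
def Spec_append_rocket_tbl (results_tbl : List (String × List Int)) (rockets_1 : List String) (rockets_2 : List String) (out : List (String × List Int)) : Prop := out = append_rocket_tbl_alt results_tbl rockets_1 rockets_2
instance (results_tbl : List (String × List Int)) (rockets_1 : List String) (rockets_2 : List String) (out : List (String × List Int)) : Decidable (Spec_append_rocket_tbl results_tbl rockets_1 rockets_2 out) := by unfold Spec_append_rocket_tbl; infer_instance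

-- ===== CLAIM (what is proved, stated in full; the proofs are below) =====
def Claim_equal_append_rocket_tbl : Prop := ∀ (results_tbl : List (String × List Int)) (rockets_1 : List String) (rockets_2 : List String), Dom_append_rocket_tbl results_tbl rockets_1 rockets_2 → Spec_append_rocket_tbl results_tbl rockets_1 rockets_2 (append_rocket_tbl results_tbl rockets_1 rockets_2)

-- ===== LEMMAS AND PROOFS =====

-- A guarded-insert fold over pairs whose keys avoid k leaves get? k unchanged.
theorem fold_ins_get?_nomem (l : List (String × Int)) (P : String × Int → Prop)
    [DecidablePred P] (f : String × Int → Int) (d0 : PySem.Dict String Int) (k : String)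
    (h : ∀ kv ∈ l, kv.1 ≠ k) :
    (l.foldl (fun d kv => if P kv then d.insert kv.1 (f kv) else d) d0).get? k = d0.get? k := by
  induction l generalizing d0 with
  | nil => rfl
  | cons hd tl ih =>
    have hhd : hd.1 ≠ k := h hd (by simp)
    have := ih (if P hd then d0.insert hd.1 (f hd) else d0) (fun kv hm => h kv (by simp [hm]))
    simp only [List.foldl_cons, this]
    by_cases hp : P hd <;> simp [hp, PySem.Dict.get?_insert_of_ne d0 (f hd) (Ne.symm hhd)]

-- With (k, v) the unique pair at key k, the fold's get? k is decided by the guard at (k, v).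
theorem fold_ins_get?_mem (l : List (String × Int)) (P : String × Int → Prop)
    [DecidablePred P] (f : String × Int → Int) (d0 : PySem.Dict String Int) (k : String)
    (v : Int) (hnd : (l.map Prod.fst).Nodup) (hmem : (k, v) ∈ l) :
    (l.foldl (fun d kv => if P kv then d.insert kv.1 (f kv) else d) d0).get? k
      = if P (k, v) then some (f (k, v)) else d0.get? k := by
  induction l generalizing d0 with
  | nil => simp at hmem
  | cons hd tl ih =>
    simp only [List.map_cons, List.nodup_cons] at hnd
    rcases List.mem_cons.mp hmem with heq | htl
    · subst heq
      have hno : ∀ kv ∈ tl, kv.1 ≠ k := by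
        intro kv hm hke
        have h1 : kv.1 ∈ tl.map Prod.fst := List.mem_map_of_mem hm
        rw [hke] at h1
        exact hnd.1 h1
      simp only [List.foldl_cons, fold_ins_get?_nomem tl P f _ k hno]
      by_cases hp : P (k, v) <;> simp [hp, PySem.Dict.get?_insert_self]
    · have hne : hd.1 ≠ k := by
        intro hke
        have h1 : (k, v).1 ∈ tl.map Prod.fst := List.mem_map_of_mem htl
        rw [← hke] at h1
        exact hnd.1 h1
      simp only [List.foldl_cons, ih _ hnd.2 htl]
      by_cases hp : P hd <;>
        simp [hp, PySem.Dict.get?_insert_of_ne d0 (f hd) (Ne.symm hne)]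

theorem nodup_fst_items_counter (xs : List String) :
    ((PySem.Dict.counter xs).items.map Prod.fst).Nodup := by
  have h : (PySem.Dict.counter xs).items.map Prod.fst = (PySem.Dict.counter xs).keys := rfl
  rw [h, PySem.Dict.keys_counter]
  exact PySem.Set.nodup_ofList xs

theorem mem_items_counter_of_mem (xs : List String) (k : String) (h : k ∈ xs) :
    (k, (xs.count k : Int)) ∈ (PySem.Dict.counter xs).items := by
  rw [PySem.Dict.items_counter]
  exact List.mem_map_of_mem ((PySem.Set.mem_ofList xs k).mpr h)

theorem fst_items_counter_ne (xs : List String) (k : String) (h : k ∉ xs) :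
    ∀ kv ∈ (PySem.Dict.counter xs).items, kv.1 ≠ k := by
  intro kv hm hke
  rw [PySem.Dict.items_counter] at hm
  rcases List.mem_map.mp hm with ⟨a, ha, hae⟩
  apply h
  have hak : a = k := by rw [← hke, ← hae]
  exact hak ▸ (PySem.Set.mem_ofList xs a).mp ha

-- Key lemma: the value A appends for key k equals count in rockets_1 plus count in rockets_2.
theorem pvCounterAdd_value (r1 r2 : List String) (k : String) :
    (if (pvCounterAdd (PySem.Dict.counter r1) (PySem.Dict.counter r2)).contains k
     then (pvCounterAdd (PySem.Dict.counter r1) (PySem.Dict.counter r2)).getD k 0 else 0)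
      = (r1.count k : Int) + (r2.count k : Int) := by
  rw [PySem.Dict.contains_eq_isSome_get?, PySem.Dict.getD_eq_get?_getD]
  unfold pvCounterAdd
  by_cases h2 : k ∈ r2
  all_goals by_cases h1 : k ∈ r1
  case pos =>
    rw [fold_ins_get?_mem _ _ _ _ k ((r2.count k : Int)) (nodup_fst_items_counter r2)
        (mem_items_counter_of_mem r2 k h2),
        fold_ins_get?_mem _ _ _ _ k ((r1.count k : Int)) (nodup_fst_items_counter r1)
        (mem_items_counter_of_mem r1 k h1)]
    have hc1 : (0 : Int) < r1.count k := by exact_mod_cast List.count_pos_iff.mpr h1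
    have hc2 : (0 : Int) < r2.count k := by exact_mod_cast List.count_pos_iff.mpr h2
    have hcon : (PySem.Dict.counter r1).contains k = true := by
      rw [PySem.Dict.contains_counter]; exact List.contains_iff_mem.mpr h1
    simp only [PySem.Dict.getD_counter, PySem.Dict.get?_empty]
    split_ifs <;> simp_all; omega
  case neg =>
    rw [fold_ins_get?_mem _ _ _ _ k ((r2.count k : Int)) (nodup_fst_items_counter r2)
        (mem_items_counter_of_mem r2 k h2),
        fold_ins_get?_nomem _ _ _ _ k (fst_items_counter_ne r1 k h1)]
    have hc2 : (0 : Int) < r2.count k := by exact_mod_cast List.count_pos_iff.mpr h2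
    have hcon : (PySem.Dict.counter r1).contains k = false := by
      rw [PySem.Dict.contains_counter]; simp [h1]
    have hcnt1 : r1.count k = 0 := List.count_eq_zero.mpr h1
    simp only [PySem.Dict.get?_empty]
    split_ifs <;> simp_all
  case pos =>
    rw [fold_ins_get?_nomem _ _ _ _ k (fst_items_counter_ne r2 k h2),
        fold_ins_get?_mem _ _ _ _ k ((r1.count k : Int)) (nodup_fst_items_counter r1)
        (mem_items_counter_of_mem r1 k h1)]
    have hc1 : (0 : Int) < r1.count k := by exact_mod_cast List.count_pos_iff.mpr h1
    have hcnt2 : r2.count k = 0 := List.count_eq_zero.mpr h2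
    simp only [PySem.Dict.getD_counter, PySem.Dict.get?_empty]
    split_ifs <;> simp_all
  case neg =>
    rw [fold_ins_get?_nomem _ _ _ _ k (fst_items_counter_ne r2 k h2),
        fold_ins_get?_nomem _ _ _ _ k (fst_items_counter_ne r1 k h1)]
    have hcnt1 : r1.count k = 0 := List.count_eq_zero.mpr h1
    have hcnt2 : r2.count k = 0 := List.count_eq_zero.mpr h2
    simp [PySem.Dict.get?_empty, hcnt1, hcnt2]

-- A's fold equals the canonical map form.
theorem portA_eq_map (tbl : List (String × List Int)) (r1 r2 : List String) :
    append_rocket_tbl tbl r1 r2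
      = tbl.map (fun kv => (kv.1, kv.2 ++ [((r1.count kv.1 : Int) + (r2.count kv.1 : Int))])) := by
  unfold append_rocket_tbl
  have hstep : (fun (acc : List (String × List Int)) (kv : String × List Int) =>
      if (pvCounterAdd (PySem.Dict.counter r1) (PySem.Dict.counter r2)).contains kv.1
      then acc ++ [(kv.1, kv.2 ++ [(pvCounterAdd (PySem.Dict.counter r1) (PySem.Dict.counter r2)).getD kv.1 0])]
      else acc ++ [(kv.1, kv.2 ++ [(0 : Int)])])
      = fun acc kv => acc ++ [(kv.1, kv.2 ++ [((r1.count kv.1 : Int) + (r2.count kv.1 : Int))])] := by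
    funext acc kv
    have hv := pvCounterAdd_value r1 r2 kv.1
    by_cases hc : (pvCounterAdd (PySem.Dict.counter r1) (PySem.Dict.counter r2)).contains kv.1
    · rw [if_pos hc]; rw [if_pos hc] at hv; rw [hv]
    · rw [if_neg hc]; rw [if_neg hc] at hv; rw [hv]
  show List.foldl _ [] tbl = _
  rw [hstep]
  exact PySem.List.foldl_append_singleton_eq_map _ tbl []

-- zipWith twice against the same left list fuses pointwise.
theorem zipWith_zipWith_same {α β : Type} (f g : α → β → β) (l : List α) (t : List β) :
    List.zipWith f l (List.zipWith g l t) = List.zipWith (fun a b => f a (g a b)) l t := by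
  induction l generalizing t with
  | nil => simp
  | cons a l ih => cases t with
    | nil => simp
    | cons b t => simp [ih]

-- Scatter invariant: folding the increment step over L adds L.count of each row's key.
theorem scatter_fold (tbl : List (String × List Int)) (L : List String) (t : List Int)
    (ht : t.length = tbl.length) :
    L.foldl (fun t r => List.zipWith (fun (kv : String × List Int) ti =>
        if kv.1 = r then ti + 1 else ti) tbl t) t
      = List.zipWith (fun kv ti => ti + (L.count kv.1 : Int)) tbl t := by
  induction L generalizing t with
  | nil =>
    simp only [List.foldl_nil, List.count_nil, Nat.cast_zero, add_zero]
    induction tbl generalizing t with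
    | nil =>
      rw [List.zipWith_nil_left]
      exact List.length_eq_zero_iff.mp (by simpa using ht)
    | cons a l ih => cases t with
      | nil => simp at ht
      | cons b t =>
        rw [List.zipWith_cons_cons]
        exact congrArg (b :: ·) (ih t (by simpa using ht))
  | cons r L ih =>
    have hlen : (List.zipWith (fun (kv : String × List Int) ti =>
        if kv.1 = r then ti + 1 else ti) tbl t).length = tbl.length := by
      simp [List.length_zipWith, ht]
    simp only [List.foldl_cons, ih _ hlen, zipWith_zipWith_same]
    congr 1
    funext kv ti
    rw [List.count_cons]
    by_cases h : kv.1 = r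
    · subst h
      simp only [beq_self_eq_true, if_true]
      push_cast
      ring
    · have hb : (r == kv.1) = false := beq_eq_false_iff_ne.mpr (Ne.symm h)
      simp only [if_neg h, hb, Bool.false_eq_true, if_false]
      push_cast
      ring

-- zipWith an add against a zero replicate is a map.
theorem zipWith_replicate_add {α : Type} (f : α → Int) (l : List α) :
    List.zipWith (fun a ti => ti + f a) l (List.replicate l.length 0) = l.map f := by
  induction l with
  | nil => simp
  | cons a l ih => simp [List.replicate_succ, ih]

-- zipping a list with a map of itself is a map to pairs.
theorem zip_self_map {α β : Type} (g : α → β) (l : List α) :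
    l.zip (l.map g) = l.map (fun x => (x, g x)) := by
  induction l with
  | nil => simp
  | cons a l ih => simp [ih]

-- ===== VERDICT (by name: the statement is the Claim_ definition above) =====
theorem append_rocket_tbl_spec : Claim_equal_append_rocket_tbl := by
  intro tbl r1 r2 _
  unfold Spec_append_rocket_tbl
  rw [portA_eq_map]
  simp only [append_rocket_tbl_alt]
  rw [scatter_fold _ _ _ (by simp), zipWith_replicate_add, zip_self_map, List.map_map]
  apply List.map_congr_left
  intro kv _
  simp [List.count_append]
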